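-- pv_equiv track=rewrite | github.com/wiedzmin1414/Analiza-algorytmow | lista2.py | haa
-- ===== SOURCE A (Python) =====
-- ddd = 2**31-1
--
-- eee = 16807
--
-- fff = 2**32
--
-- def haa(seed,ile):
--     r = [seed]
--     for i in range(30):
--         seed = eee*seed % ddd
--         r.append(seed)
--     for i in range(3):
--         r.append( r[i] )
--     for i in range(310+ile):
--         r.append( (r[i+31] + r[i+3]) % fff)
--     return r[344:]
-- ===== SOURCE B (Python) =====
-- ddd = 2**31 - 1
-- eee = 16807
-- fff = 2**32
--
-- def haa(seed, ile):
--     # seed stream: seed, 30 LCG steps, then the first three values again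
--     vals = [seed]
--     for _ in range(30):
--         seed = eee * seed % ddd
--         vals.append(seed)
--     # ring buffer = the last 31 of the 34 seed-stream values
--     buf = vals[3:] + vals[:3]
--     pos = 0          # index of the oldest entry (the value 31 back)
--     out = []
--     for _ in range(310 + ile):
--         v = (buf[pos] + buf[(pos + 28) % 31]) % fff
--         buf[pos] = v
--         pos = (pos + 1) % 31
--         out.append(v)
--     # the first 310 generated values are warmup
--     return out[310:]
-- ===== Notes on version B (the rewrite author's own statement) =====
-- stated objective: alternative
-- what changed: B replaces A's unbounded ever-growing list (34+310+ile entries, indexed absolutely) by a fixed 31-slot ring buffer with a modular write pointer, emitting generated values into a separate output list and dropping the 310 warmup values.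
import Mathlib
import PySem

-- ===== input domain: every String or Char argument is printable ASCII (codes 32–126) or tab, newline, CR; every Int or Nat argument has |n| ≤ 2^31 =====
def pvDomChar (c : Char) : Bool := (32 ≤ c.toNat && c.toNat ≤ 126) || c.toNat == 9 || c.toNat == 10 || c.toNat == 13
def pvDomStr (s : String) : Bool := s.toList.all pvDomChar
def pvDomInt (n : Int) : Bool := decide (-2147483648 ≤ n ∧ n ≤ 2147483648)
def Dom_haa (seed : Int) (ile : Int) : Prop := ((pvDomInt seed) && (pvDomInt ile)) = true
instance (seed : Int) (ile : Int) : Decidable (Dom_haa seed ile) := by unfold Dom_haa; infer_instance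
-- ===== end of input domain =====

-- B replaces A's unbounded growing list by a fixed 31-slot ring buffer with a modular
-- write pointer and a separate output list (alternative data structure, same cost).


def ddd : Int := 2^31 - 1
def eee : Int := 16807
def fff : Int := 2^32

-- ===== PORT A =====
-- indices r[i], r[i+31], r[i+3] are always in range in Python (the list only grows),
-- so pyGet? never returns none and '.getD 0' is exact.
def haa (seed : Int) (ile : Int) : List Int :=
  let st := (PySem.List.pyRange 0 30 1).foldl
    (fun (p : Int × List Int) _ =>
      let s := PySem.Int.mod (eee * p.1) ddd
      (s, p.2 ++ [s])) (seed, [seed])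
  let r := st.2
  let r := (PySem.List.pyRange 0 3 1).foldl
    (fun r i => r ++ [(PySem.List.pyGet? r i).getD 0]) r
  let r := (PySem.List.pyRange 0 (310 + ile) 1).foldl
    (fun r i => r ++ [PySem.Int.mod ((PySem.List.pyGet? r (i + 31)).getD 0
                                     + (PySem.List.pyGet? r (i + 3)).getD 0) fff]) r
  PySem.List.slice r (some 344) none

-- ===== PORT B =====
-- buf[pos] read/write and buf[(pos+28)%31]: indices are always in 0..30, so
-- pyGet? never returns none and '.getD 0' / '.set pos.toNat' are exact.
def haaAltStep (st : List Int × Int × List Int) (_ : Int) : List Int × Int × List Int :=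
  let buf := st.1
  let pos := st.2.1
  let out := st.2.2
  let v := PySem.Int.mod ((PySem.List.pyGet? buf pos).getD 0
             + (PySem.List.pyGet? buf (PySem.Int.mod (pos + 28) 31)).getD 0) fff
  (buf.set pos.toNat v, PySem.Int.mod (pos + 1) 31, out ++ [v])

def haa_alt (seed : Int) (ile : Int) : List Int :=
  let st := (PySem.List.pyRange 0 30 1).foldl
    (fun (p : Int × List Int) _ =>
      let s := PySem.Int.mod (eee * p.1) ddd
      (s, p.2 ++ [s])) (seed, [seed])
  let vals := st.2
  let buf := PySem.List.slice vals (some 3) none ++ PySem.List.slice vals none (some 3)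
  let st2 := (PySem.List.pyRange 0 (310 + ile) 1).foldl haaAltStep (buf, 0, [])
  PySem.List.slice st2.2.2 (some 310) none

-- ===== PRECONDITION & SPEC =====
def Spec_haa (seed : Int) (ile : Int) (out : List Int) : Prop := out = haa_alt seed ile
instance (seed : Int) (ile : Int) (out : List Int) : Decidable (Spec_haa seed ile out) := by unfold Spec_haa; infer_instance

-- ===== CLAIM (what is proved, stated in full; the proofs are below) =====
def Claim_equal_haa : Prop := ∀ (seed : Int) (ile : Int), Dom_haa seed ile → Spec_haa seed ile (haa seed ile)

-- ===== LEMMAS AND PROOFS =====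

-- the LCG iterates
def pvLcg (x : Int) : Int := PySem.Int.mod (eee * x) ddd

def pvLcgs (seed : Int) : Nat → Int
  | 0 => seed
  | n + 1 => pvLcg (pvLcgs seed n)

-- the full stream: 31 LCG values, the first three repeated, then the lagged recurrence
def pvS (seed : Int) (n : Nat) : Int :=
  if n < 31 then pvLcgs seed n
  else if n < 34 then pvLcgs seed (n - 31)
  else PySem.Int.mod (pvS seed (n - 31) + pvS seed (n - 3)) fff
termination_by n
decreasing_by all_goals omega

theorem pvS_lt31 (seed : Int) (n : Nat) (h : n < 31) : pvS seed n = pvLcgs seed n := by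
  rw [pvS]; simp [h]

theorem pvS_mid (seed : Int) (n : Nat) (h1 : 31 ≤ n) (h2 : n < 34) :
    pvS seed n = pvLcgs seed (n - 31) := by
  rw [pvS]; simp [Nat.not_lt_of_le h1, h2]

theorem pvS_ge34 (seed : Int) (n : Nat) (h : 34 ≤ n) :
    pvS seed n = PySem.Int.mod (pvS seed (n - 31) + pvS seed (n - 3)) fff := by
  rw [pvS]; simp [show ¬ n < 31 by omega, show ¬ n < 34 by omega]

theorem pvLcgs_shift (x : Int) (n : Nat) : pvLcgs (pvLcg x) n = pvLcgs x (n + 1) := by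
  induction n with
  | zero => rfl
  | succ n ih => simp [pvLcgs, ih]

theorem pvLcgs_shift' (x : Int) (n : Nat) : pvLcgs (pvLcg x) n = pvLcg (pvLcgs x n) := by
  rw [pvLcgs_shift]; rfl

-- the seeding fold, for any ignored-element list
theorem pv_seed_fold (l : List Int) (x : Int) (r : List Int) :
    l.foldl (fun (p : Int × List Int) _ =>
      let s := PySem.Int.mod (eee * p.1) ddd
      (s, p.2 ++ [s])) (x, r)
    = (pvLcgs x l.length, r ++ (List.range l.length).map (fun k => pvLcgs x (k + 1))) := by
  induction l generalizing x r with
  | nil => simp [pvLcgs]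
  | cons a l ih =>
      simp only [List.foldl_cons]
      rw [ih (PySem.Int.mod (eee * x) ddd) (r ++ [PySem.Int.mod (eee * x) ddd])]
      have hl : PySem.Int.mod (eee * x) ddd = pvLcg x := rfl
      rw [hl]
      simp only [Prod.mk.injEq, List.length_cons]
      refine ⟨by simp [pvLcgs_shift], ?_⟩
      rw [List.append_assoc]
      congr 1
      rw [List.range_succ_eq_map]
      simp only [List.singleton_append, List.map_cons, List.map_map, List.cons.injEq]
      refine ⟨rfl, List.map_congr_left fun k _ => ?_⟩
      simp only [Function.comp_apply]
      rw [pvLcgs_shift']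
      rfl

-- the 34-value seed prefix
theorem pv_prefix (seed : Int) :
    [seed] ++ (List.range 30).map (fun k => pvLcgs seed (k + 1))
      = (List.range 31).map (pvLcgs seed) := by
  rw [show (31:Nat) = 30 + 1 from rfl, List.range_succ_eq_map]
  rfl

theorem pv_vals_eq (seed : Int) :
    ((PySem.List.pyRange 0 30 1).foldl
      (fun (p : Int × List Int) _ =>
        let s := PySem.Int.mod (eee * p.1) ddd
        (s, p.2 ++ [s])) (seed, [seed])).2
    = (List.range 31).map (pvLcgs seed) := by
  rw [pv_seed_fold]
  have : (PySem.List.pyRange 0 30 1).length = 30 := by decide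
  rw [this, ← pv_prefix]

-- r after A's second loop = the 34-value prefix of pvS
theorem pv_r34 (seed : Int) :
    (PySem.List.pyRange 0 3 1).foldl
      (fun r i => r ++ [(PySem.List.pyGet? r i).getD 0]) ((List.range 31).map (pvLcgs seed))
    = (List.range 34).map (pvS seed) := by
  have hr : PySem.List.pyRange 0 3 1 = [0, 1, 2] := by decide
  rw [hr]
  simp only [List.foldl_cons, List.foldl_nil]
  have h0 : PySem.List.pyGet? ((List.range 31).map (pvLcgs seed)) (0 : Int)
      = some (pvLcgs seed 0) := by
    rw [PySem.List.pyGet?_of_nonneg _ (by norm_num)]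
    simp
  rw [h0]
  simp only [Option.getD_some]
  have h1 : PySem.List.pyGet? ((List.range 31).map (pvLcgs seed) ++ [pvLcgs seed 0]) (1 : Int)
      = some (pvLcgs seed 1) := by
    rw [PySem.List.pyGet?_of_nonneg _ (by norm_num)]
    rw [List.getElem?_append_left (by simp)]
    simp
  rw [h1]
  simp only [Option.getD_some]
  have h2 : PySem.List.pyGet?
      (((List.range 31).map (pvLcgs seed) ++ [pvLcgs seed 0]) ++ [pvLcgs seed 1]) (2 : Int)
      = some (pvLcgs seed 2) := by
    rw [PySem.List.pyGet?_of_nonneg _ (by norm_num)]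
    rw [List.getElem?_append_left (by simp)]
    rw [List.getElem?_append_left (by simp)]
    simp
  rw [h2]
  simp only [Option.getD_some]
  apply List.ext_getElem
  · simp
  · intro i h1' h2'
    simp only [List.getElem_map, List.getElem_range]
    have hlen : ((List.range 31).map (pvLcgs seed)).length = 31 := by simp
    by_cases hi : i < 31
    · rw [List.getElem_append_left (by simp; omega), List.getElem_append_left (by simp; omega),
          List.getElem_append_left (by simpa using hi)]
      rw [pvS_lt31 seed i hi]
      simp
    · have hi' : 31 ≤ i := by omega
      have hi34 : i < 34 := by
        simpa using h2'
      rw [pvS_mid seed i hi' hi34]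
      interval_cases i
      · rw [List.getElem_append_left (by simp), List.getElem_append_left (by simp),
            List.getElem_append_right (by simp)]
        simp
      · rw [List.getElem_append_left (by simp), List.getElem_append_right (by simp)]
        simp
      · rw [List.getElem_append_right (by simp)]
        simp

-- A's third loop invariant
theorem pv_loop3 (seed : Int) (m : Nat) :
    (PySem.List.pyRange 0 (m : Int) 1).foldl
      (fun r i => r ++ [PySem.Int.mod ((PySem.List.pyGet? r (i + 31)).getD 0
                                       + (PySem.List.pyGet? r (i + 3)).getD 0) fff])
      ((List.range 34).map (pvS seed))
    = (List.range (34 + m)).map (pvS seed) := by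
  induction m with
  | zero =>
      rw [show ((0 : Nat) : Int) = 0 from rfl, PySem.List.pyRange_one_eq_nil (by norm_num)]
      rfl
  | succ m ih =>
      have hcast : ((m + 1 : Nat) : Int) = (m : Int) + 1 := by push_cast; ring
      rw [hcast, PySem.List.pyRange_one_succ_right (by exact_mod_cast Nat.zero_le m)]
      rw [List.foldl_append, ih]
      simp only [List.foldl_cons, List.foldl_nil]
      have hg : ∀ (k : Nat), k < 34 + m →
          PySem.List.pyGet? ((List.range (34 + m)).map (pvS seed)) ((k : Nat) : Int)
            = some (pvS seed k) := by
        intro k hk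
        rw [PySem.List.pyGet?_natCast]
        simp [hk]
      have e31 : ((m : Int) + 31) = ((m + 31 : Nat) : Int) := by push_cast; ring
      have e3 : ((m : Int) + 3) = ((m + 3 : Nat) : Int) := by push_cast; ring
      rw [e31, e3, hg (m + 31) (by omega), hg (m + 3) (by omega)]
      simp only [Option.getD_some]
      rw [show 34 + (m + 1) = (34 + m) + 1 from by omega, List.range_succ, List.map_append]
      congr 1
      simp only [List.map_cons, List.map_nil]
      rw [pvS_ge34 seed (34 + m) (by omega)]
      rw [show 34 + m - 31 = m + 3 from by omega, show 34 + m - 3 = m + 31 from by omega]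
      rw [Int.add_comm]

-- the ring-buffer state after i iterations of B's loop
def pvBuf (seed : Int) (i : Nat) : List Int :=
  (List.range 31).map (fun j => pvS seed (3 + i + (j + 31 - i % 31) % 31))

def pvStB (seed : Int) (i : Nat) : List Int × Int × List Int :=
  (pvBuf seed i, ((i % 31 : Nat) : Int), (List.range i).map (fun k => pvS seed (34 + k)))

theorem pv_bufget (seed : Int) (i j : Nat) (hj : j < 31) :
    PySem.List.pyGet? (pvBuf seed i) ((j : Nat) : Int)
      = some (pvS seed (3 + i + (j + 31 - i % 31) % 31)) := by
  rw [pvBuf, PySem.List.pyGet?_natCast]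
  simp [hj]

theorem pv_stepB (seed : Int) (i : Nat) (a : Int) :
    haaAltStep (pvStB seed i) a = pvStB seed (i + 1) := by
  have h31 : (0 : Nat) < 31 := by omega
  have h1 : PySem.List.pyGet? (pvBuf seed i) ((i % 31 : Nat) : Int)
      = some (pvS seed (3 + i)) := by
    rw [pv_bufget seed i (i % 31) (Nat.mod_lt _ h31)]
    congr 2
    omega
  have hmod28 : PySem.Int.mod (((i % 31 : Nat) : Int) + 28) 31
      = (((i % 31 + 28) % 31 : Nat) : Int) := by
    rw [show ((i % 31 : Nat) : Int) + 28 = ((i % 31 + 28 : Nat) : Int) from by push_cast; ring,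
        show (31 : Int) = ((31 : Nat) : Int) from rfl]
    exact PySem.Int.mod_natCast _ _
  have h2 : PySem.List.pyGet? (pvBuf seed i) ((((i % 31 + 28) % 31 : Nat)) : Int)
      = some (pvS seed (31 + i)) := by
    rw [pv_bufget seed i _ (Nat.mod_lt _ h31)]
    congr 2
    omega
  have hv : PySem.Int.mod (pvS seed (3 + i) + pvS seed (31 + i)) fff = pvS seed (34 + i) := by
    rw [pvS_ge34 seed (34 + i) (by omega)]
    rw [show 34 + i - 31 = 3 + i from by omega, show 34 + i - 3 = 31 + i from by omega]
  dsimp only [haaAltStep, pvStB]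
  rw [h1, hmod28, h2]
  simp only [Option.getD_some, hv, Prod.mk.injEq]
  refine ⟨?_, ?_, ?_⟩
  · -- buffer update
    rw [show ((i % 31 : Nat) : Int).toNat = i % 31 from by omega]
    apply List.ext_getElem
    · simp [pvBuf]
    · intro j hlen1 hlen2
      have hj : j < 31 := by simpa [pvBuf] using hlen2
      rw [List.getElem_set]
      simp only [pvBuf, List.getElem_map, List.getElem_range]
      split
      · next heq => congr 1; omega
      · next hne => congr 1; omega
  · -- position update
    rw [show ((i % 31 : Nat) : Int) + 1 = ((i % 31 + 1 : Nat) : Int) from by push_cast; ring,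
        show (31 : Int) = ((31 : Nat) : Int) from rfl,
        PySem.Int.mod_natCast]
    congr 1
    omega
  · -- output update
    rw [List.range_succ, List.map_append]
    simp

theorem pv_loopB (seed : Int) (l : List Int) (i : Nat) :
    l.foldl haaAltStep (pvStB seed i) = pvStB seed (i + l.length) := by
  induction l generalizing i with
  | nil => simp
  | cons a l ih =>
      rw [List.foldl_cons, pv_stepB seed i a, ih (i + 1)]
      congr 1
      simp
      omega

-- B's initial buffer is the ring state at i = 0
theorem pv_buf0 (seed : Int) :
    PySem.List.slice ((List.range 31).map (pvLcgs seed)) (some 3) none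
      ++ PySem.List.slice ((List.range 31).map (pvLcgs seed)) none (some 3)
    = pvBuf seed 0 := by
  rw [PySem.List.slice_from _ (by norm_num), PySem.List.slice_to _ (by norm_num)]
  rw [show ((3 : Int)).toNat = 3 from rfl]
  apply List.ext_getElem
  · simp [pvBuf]
  · intro j h1 h2
    have hj : j < 31 := by simpa [pvBuf] using h2
    simp only [pvBuf, List.getElem_map, List.getElem_range]
    by_cases hj28 : j < 28
    · rw [List.getElem_append_left (by simp; omega)]
      rw [List.getElem_drop]
      simp only [List.getElem_map, List.getElem_range]
      rw [pvS_lt31 seed _ (by omega)]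
      exact congrArg _ (by omega)
    · rw [List.getElem_append_right (by simp; omega)]
      rw [List.getElem_take]
      simp only [List.getElem_map, List.getElem_range, List.length_drop, List.length_map,
        List.length_range]
      rw [pvS_mid seed _ (by omega) (by omega)]
      exact congrArg _ (by omega)

-- ===== VERDICT (by name: the statement is the Claim_ definition above) =====
theorem haa_spec : Claim_equal_haa := by
  intro seed ile _
  unfold Spec_haa
  simp only [haa, haa_alt]
  rw [pv_vals_eq, pv_r34, pv_buf0]
  have hN : PySem.List.pyRange 0 (310 + ile) 1
      = PySem.List.pyRange 0 (((310 + ile).toNat : Nat) : Int) 1 := by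
    rw [PySem.List.pyRange_one, PySem.List.pyRange_one]
    congr 2
    omega
  rw [hN, pv_loop3]
  rw [show ((pvBuf seed 0, (0 : Int), ([] : List Int)) : List Int × Int × List Int)
        = pvStB seed 0 from by simp [pvStB]]
  rw [pv_loopB]
  dsimp only [pvStB]
  rw [PySem.List.slice_from _ (by norm_num), PySem.List.slice_from _ (by norm_num)]
  rw [show ((344 : Int)).toNat = 344 from rfl, show ((310 : Int)).toNat = 310 from rfl]
  rw [PySem.List.length_pyRange_one]
  apply List.ext_getElem
  · simp
    omega
  · intro i h1 h2
    rw [List.getElem_drop, List.getElem_drop]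
    simp only [List.getElem_map, List.getElem_range]
    congr 1
    omega
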